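-- pv_equiv track=rewrite | github.com/razahai/academic | ai/2/grf/gw2.py | pathsToDirection
-- ===== SOURCE A (Python) =====
-- POSSIBILITIES = {
--     "N": "N",
--     "E": "E",
--     "S": "S",
--     "W": "W",
--     "EN": "L",
--     "SW": "7",
--     "ES": "r",
--     "NW": "J",
--     "EW": "-",
--     "NS": "|",
--     "ENSW": "+",
--     "ENW": "^",
--     "ESW": "v",
--     "ENS": ">",
--     "NSW": "<",
--     "": "."
-- }
--
-- def pathsToDirection(v, graph, width, paths):
--     directions = ""
--     jumps = []
--
--     if v in paths:
--         return ("*", jumps)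
--
--     for path in paths:
--         if v+1 == path and width != 1 and not v in range(width-1, len(graph), width):
--             directions += "E"
--         elif v-1 == path and width != 1 and not v in range(0, len(graph)-width+1, width):
--             directions += "W"
--         elif v-width == path and width < len(graph) and not v in range(0, width):
--             directions += "N"
--         elif v+width == path and width < len(graph) and not v in range(len(graph)-width, len(graph)):
--             directions += "S"
--         else:
--             jumps.append((v, path))
--
--     directions = "".join(sorted(directions))
--     return (POSSIBILITIES[directions], jumps)
-- ===== SOURCE B (Python) =====
-- POSSIBILITIES = {
--     "N": "N",
--     "E": "E",
--     "S": "S",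
--     "W": "W",
--     "EN": "L",
--     "SW": "7",
--     "ES": "r",
--     "NW": "J",
--     "EW": "-",
--     "NS": "|",
--     "ENSW": "+",
--     "ENW": "^",
--     "ESW": "v",
--     "ENS": ">",
--     "NSW": "<",
--     "": "."
-- }
--
-- def pathsToDirection(v, graph, width, paths):
--     # Direction-major formulation: instead of classifying each path with an
--     # elif chain and sorting the collected letters, enumerate the four
--     # directions in already-sorted letter order (E < N < S < W) and test set
--     # membership of each valid neighbour index; jumps is a separate filter.
--     if v in paths:
--         return ("*", [])
--     n = len(graph)
--     present = set(paths)
--     candidates = [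
--         ("E", v + 1, width != 1 and v not in range(width - 1, n, width)),
--         ("N", v - width, width < n and v not in range(0, width)),
--         ("S", v + width, width < n and v not in range(n - width, n)),
--         ("W", v - 1, width != 1 and v not in range(0, n - width + 1, width)),
--     ]
--     directions = "".join(d for d, idx, ok in candidates if ok and idx in present)
--     valid = {idx for d, idx, ok in candidates if ok}
--     jumps = [(v, p) for p in paths if p not in valid]
--     return (POSSIBILITIES[directions], jumps)
-- ===== Notes on version B (the rewrite author's own statement) =====
-- stated objective: alternative
-- what changed: B is direction-major instead of path-major: it enumerates the four directions once in already-sorted letter order (E<N<S<W) and tests set-membership of each valid neighbour index in paths, with jumps as a separate filter against the valid-neighbour set, replacing A's per-path elif classification followed by sorting the collected letters.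
-- outside the precondition, e.g. on pathsToDirection(0, [1, 2, 3, 4], -1, [1]): A returns ('E', []), B returns ('L', []); on pathsToDirection(0, [5, 5], 0, [9]): A returns ('.', [(0, 9)]), B raises ValueError; on pathsToDirection(0, [9, 9, 9, 9], 2, [1, 1]): A raises KeyError, B returns ('E', [])
import Mathlib
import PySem

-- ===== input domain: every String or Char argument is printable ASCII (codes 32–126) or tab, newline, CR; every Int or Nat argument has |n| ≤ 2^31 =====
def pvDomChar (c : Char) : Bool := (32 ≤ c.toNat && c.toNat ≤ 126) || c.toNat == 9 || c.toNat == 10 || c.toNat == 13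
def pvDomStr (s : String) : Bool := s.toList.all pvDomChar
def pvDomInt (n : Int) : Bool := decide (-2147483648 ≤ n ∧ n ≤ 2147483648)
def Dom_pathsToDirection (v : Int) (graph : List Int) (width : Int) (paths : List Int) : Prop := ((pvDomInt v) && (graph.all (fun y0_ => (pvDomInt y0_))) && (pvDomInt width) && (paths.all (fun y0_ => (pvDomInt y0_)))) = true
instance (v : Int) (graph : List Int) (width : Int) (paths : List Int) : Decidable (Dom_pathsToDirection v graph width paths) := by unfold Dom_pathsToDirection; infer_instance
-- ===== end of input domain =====

-- B is direction-major: it enumerates the four directions once in already-sorted letter order and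
-- tests set membership of each valid neighbour index, instead of A's per-path elif chain plus sort;
-- objective: alternative.

-- ===== PORT A =====
-- Python dict literal POSSIBILITIES; Python raises KeyError on a missing key — those inputs are
-- outside Pre_pathsToDirection, the port returns "" there.
def POSSIBILITIES : PySem.Dict String String := PySem.Dict.ofList
  [("N", "N"), ("E", "E"), ("S", "S"), ("W", "W"), ("EN", "L"), ("SW", "7"), ("ES", "r"),
   ("NW", "J"), ("EW", "-"), ("NS", "|"), ("ENSW", "+"), ("ENW", "^"), ("ESW", "v"),
   ("ENS", ">"), ("NSW", "<"), ("", ".")]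

-- the body of A's for loop (the elif chain), as a named step function of the fold
def pvStepA (v : Int) (width : Int) (n : Int)
    (acc : List Char × List (Int × Int)) (path : Int) : List Char × List (Int × Int) :=
  if v + 1 = path ∧ width ≠ 1 ∧ v ∉ PySem.List.pyRange (width - 1) n width then
    (acc.1 ++ ['E'], acc.2)
  else if v - 1 = path ∧ width ≠ 1 ∧ v ∉ PySem.List.pyRange 0 (n - width + 1) width then
    (acc.1 ++ ['W'], acc.2)
  else if v - width = path ∧ width < n ∧ v ∉ PySem.List.pyRange 0 width 1 then
    (acc.1 ++ ['N'], acc.2)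
  else if v + width = path ∧ width < n ∧ v ∉ PySem.List.pyRange (n - width) n 1 then
    (acc.1 ++ ['S'], acc.2)
  else
    (acc.1, acc.2 ++ [(v, path)])

-- the Python string `directions` is carried as its List Char (appends and sorted are exact on it)
def pathsToDirection (v : Int) (graph : List Int) (width : Int) (paths : List Int) : String × (List (Int × Int)) :=
  if v ∈ paths then ("*", []) else
  let n : Int := graph.length
  let r := paths.foldl (pvStepA v width n) ([], [])
  ((POSSIBILITIES.get? (String.ofList (PySem.List.sorted r.1 (fun c => c) false))).getD "", r.2)

-- ===== PORT B =====
def pathsToDirection_alt (v : Int) (graph : List Int) (width : Int) (paths : List Int) : String × (List (Int × Int)) :=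
  if v ∈ paths then ("*", []) else
  let n : Int := graph.length
  let present : PySem.Set Int := PySem.Set.ofList paths
  let candidates : List (Char × Int × Bool) :=
    [('E', v + 1, decide (width ≠ 1 ∧ v ∉ PySem.List.pyRange (width - 1) n width)),
     ('N', v - width, decide (width < n ∧ v ∉ PySem.List.pyRange 0 width 1)),
     ('S', v + width, decide (width < n ∧ v ∉ PySem.List.pyRange (n - width) n 1)),
     ('W', v - 1, decide (width ≠ 1 ∧ v ∉ PySem.List.pyRange 0 (n - width + 1) width))]
  let directions : List Char :=
    (candidates.filter (fun c => c.2.2 && decide (c.2.1 ∈ present))).map (fun c => c.1)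
  let valid : PySem.Set Int :=
    PySem.Set.ofList ((candidates.filter (fun c => c.2.2)).map (fun c => c.2.1))
  let jumps := (paths.filter (fun p => decide (p ∉ valid))).map (fun p => (v, p))
  ((POSSIBILITIES.get? (String.ofList directions)).getD "", jumps)

-- ===== PRECONDITION & SPEC =====
-- Pre_ excludes: width = 0, where a range with step 0 raises ValueError (in A whenever paths holds
-- a horizontal neighbour, in B always); width = -1 with a horizontal neighbour v±1 in paths, where
-- two direction branches collide on one neighbour index (an anybody's corner of a malformed grid);
-- and duplicates in paths of a valid neighbour index, on which A's repeated letter makes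
-- POSSIBILITIES[…] raise KeyError.
def Pre_pathsToDirection (v : Int) (graph : List Int) (width : Int) (paths : List Int) : Prop :=
  v ∈ paths ∨
  (width ≠ 0 ∧ (width = -1 → (v + 1 ∉ paths ∧ v - 1 ∉ paths)) ∧
   ((width ≠ 1 ∧ v ∉ PySem.List.pyRange (width - 1) (graph.length : Int) width) → paths.count (v + 1) ≤ 1) ∧
   ((width ≠ 1 ∧ v ∉ PySem.List.pyRange 0 ((graph.length : Int) - width + 1) width) → paths.count (v - 1) ≤ 1) ∧
   ((width < (graph.length : Int) ∧ v ∉ PySem.List.pyRange 0 width 1) → paths.count (v - width) ≤ 1) ∧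
   ((width < (graph.length : Int) ∧ v ∉ PySem.List.pyRange ((graph.length : Int) - width) (graph.length : Int) 1) → paths.count (v + width) ≤ 1))
instance (v : Int) (graph : List Int) (width : Int) (paths : List Int) : Decidable (Pre_pathsToDirection v graph width paths) := by unfold Pre_pathsToDirection; infer_instance

def pvWitness_pathsToDirection : Int × List Int × Int × List Int := (0, [7, 7, 7, 7], 2, [1, 2, 5])

def Spec_pathsToDirection (v : Int) (graph : List Int) (width : Int) (paths : List Int) (out : String × (List (Int × Int))) : Prop := out = pathsToDirection_alt v graph width paths
instance (v : Int) (graph : List Int) (width : Int) (paths : List Int) (out : String × (List (Int × Int))) : Decidable (Spec_pathsToDirection v graph width paths out) := by unfold Spec_pathsToDirection; infer_instance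

-- ===== CLAIM (what is proved, stated in full; the proofs are below) =====
def Claim_equal_pathsToDirection : Prop := ∀ (v : Int) (graph : List Int) (width : Int) (paths : List Int), Dom_pathsToDirection v graph width paths → Pre_pathsToDirection v graph width paths → Spec_pathsToDirection v graph width paths (pathsToDirection v graph width paths)

-- ===== LEMMAS AND PROOFS =====

-- A's per-path classification, extracted: the first matching elif branch, as an Option letter
def pvCls (v width n p : Int) : Option Char :=
  if v + 1 = p ∧ width ≠ 1 ∧ v ∉ PySem.List.pyRange (width - 1) n width then some 'E'
  else if v - 1 = p ∧ width ≠ 1 ∧ v ∉ PySem.List.pyRange 0 (n - width + 1) width then some 'W'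
  else if v - width = p ∧ width < n ∧ v ∉ PySem.List.pyRange 0 width 1 then some 'N'
  else if v + width = p ∧ width < n ∧ v ∉ PySem.List.pyRange (n - width) n 1 then some 'S'
  else none

theorem pvStepA_eq (v width n : Int) (acc : List Char × List (Int × Int)) (p : Int) :
    pvStepA v width n acc p =
      match pvCls v width n p with
      | some c => (acc.1 ++ [c], acc.2)
      | none => (acc.1, acc.2 ++ [(v, p)]) := by
  unfold pvStepA pvCls; split_ifs <;> rfl

-- A's loop splits into the letter stream (filterMap pvCls) and the jump stream (filter + map)
theorem pvFoldA (v width n : Int) (paths : List Int) (l : List Char) (j : List (Int × Int)) :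
    paths.foldl (pvStepA v width n) (l, j)
    = (l ++ paths.filterMap (pvCls v width n),
       j ++ (paths.filter (fun p => (pvCls v width n p).isNone)).map (fun p => (v, p))) := by
  induction paths generalizing l j with
  | nil => simp
  | cons p t ih =>
      rw [List.foldl_cons, pvStepA_eq]
      cases h : pvCls v width n p with
      | none => simp [h, ih]
      | some c => simp [h, ih]

-- under width >= 1 the four branch tests are mutually exclusive: each letter characterises its branch
theorem pvCls_eq_E (v width n p : Int) :
    pvCls v width n p = some 'E' ↔
      (v + 1 = p ∧ width ≠ 1 ∧ v ∉ PySem.List.pyRange (width - 1) n width) := by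
  unfold pvCls; split_ifs <;> simp_all

theorem pvCls_eq_W (v width n p : Int) :
    pvCls v width n p = some 'W' ↔
      (v - 1 = p ∧ width ≠ 1 ∧ v ∉ PySem.List.pyRange 0 (n - width + 1) width) := by
  unfold pvCls; split_ifs <;> simp_all <;> omega

theorem pvCls_eq_N (v width n p : Int) (hw : width = -1 → (v + 1 ≠ p ∧ v - 1 ≠ p)) :
    pvCls v width n p = some 'N' ↔
      (v - width = p ∧ width < n ∧ v ∉ PySem.List.pyRange 0 width 1) := by
  by_cases hcol : width = -1
  · obtain ⟨ha, hb⟩ := hw hcol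
    unfold pvCls; split_ifs <;> simp_all <;> omega
  · unfold pvCls; split_ifs <;> simp_all <;> omega

theorem pvCls_eq_S (v width n p : Int) (hw0 : width ≠ 0)
    (hw : width = -1 → (v + 1 ≠ p ∧ v - 1 ≠ p)) :
    pvCls v width n p = some 'S' ↔
      (v + width = p ∧ width < n ∧ v ∉ PySem.List.pyRange (n - width) n 1) := by
  by_cases hcol : width = -1
  · obtain ⟨ha, hb⟩ := hw hcol
    unfold pvCls; split_ifs <;> simp_all <;> omega
  · unfold pvCls; split_ifs <;> simp_all <;> omega

theorem pvCls_mem (v width n p : Int) (c : Char) (h : pvCls v width n p = some c) :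
    c = 'E' ∨ c = 'W' ∨ c = 'N' ∨ c = 'S' := by
  unfold pvCls at h
  split_ifs at h <;> (try cases h) <;> tauto

theorem pvCls_isSome_iff (v width n p : Int) :
    (pvCls v width n p).isSome = true ↔
      ((v + 1 = p ∧ width ≠ 1 ∧ v ∉ PySem.List.pyRange (width - 1) n width) ∨
       (v - 1 = p ∧ width ≠ 1 ∧ v ∉ PySem.List.pyRange 0 (n - width + 1) width) ∨
       (v - width = p ∧ width < n ∧ v ∉ PySem.List.pyRange 0 width 1) ∨
       (v + width = p ∧ width < n ∧ v ∉ PySem.List.pyRange (n - width) n 1)) := by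
  unfold pvCls
  split_ifs with h1 h2 h3 h4
  · exact iff_of_true rfl (Or.inl h1)
  · exact iff_of_true rfl (Or.inr (Or.inl h2))
  · exact iff_of_true rfl (Or.inr (Or.inr (Or.inl h3)))
  · exact iff_of_true rfl (Or.inr (Or.inr (Or.inr h4)))
  · exact iff_of_false (by simp) (by tauto)

-- counting letters in A's stream: a letter occurs once per occurrence of its neighbour index
theorem pvCountP (m : Int) (G : Prop) [Decidable G] (paths : List Int) :
    (paths.countP fun p => decide (m = p ∧ G)) = if G then paths.count m else 0 := by
  by_cases hG : G
  · simp only [hG, if_true]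
    rw [List.count_eq_countP]
    apply List.countP_congr
    intro p _
    simp only [decide_eq_true_eq, beq_iff_eq, and_true]
    exact eq_comm
  · simp [hG]

-- with the Pre_ cap (count ≤ 1), a letter's count in A's stream is 0/1 by guard & membership
theorem pvKey (v width n : Int) (paths : List Int) (d : Char) (m : Int) (G : Prop) [Decidable G]
    (hiff : ∀ p ∈ paths, (pvCls v width n p = some d ↔ (m = p ∧ G)))
    (hle : G → paths.count m ≤ 1) :
    (paths.filterMap (pvCls v width n)).count d = if G ∧ m ∈ paths then 1 else 0 := by
  rw [List.count_filterMap]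
  have h1 : paths.countP (fun p => pvCls v width n p == some d)
      = paths.countP (fun p => decide (m = p ∧ G)) := by
    apply List.countP_congr
    intro p hp
    simp [hiff p hp]
  rw [h1, pvCountP]
  by_cases hG : G
  · have h2 := hle hG
    by_cases hm : m ∈ paths
    · have h3 : 0 < paths.count m := List.count_pos_iff.mpr hm
      simp only [hG, hm, and_self, if_true]
      omega
    · simp [hG, hm, List.count_eq_zero_of_not_mem hm]
  · simp [hG]

-- counts of each letter in the four-block direction list (per-letter, over abstract guards)
theorem pvCount4_E (P1 P2 P3 P4 : Prop)
    [Decidable P1] [Decidable P2] [Decidable P3] [Decidable P4] :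
    ((if P1 then ['E'] else []) ++ (if P2 then ['N'] else []) ++
     (if P3 then ['S'] else []) ++ (if P4 then ['W'] else [])).count 'E'
    = if P1 then 1 else 0 := by
  simp only [List.count_append]; split_ifs <;> simp

theorem pvCount4_N (P1 P2 P3 P4 : Prop)
    [Decidable P1] [Decidable P2] [Decidable P3] [Decidable P4] :
    ((if P1 then ['E'] else []) ++ (if P2 then ['N'] else []) ++
     (if P3 then ['S'] else []) ++ (if P4 then ['W'] else [])).count 'N'
    = if P2 then 1 else 0 := by
  simp only [List.count_append]; split_ifs <;> simp

theorem pvCount4_S (P1 P2 P3 P4 : Prop)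
    [Decidable P1] [Decidable P2] [Decidable P3] [Decidable P4] :
    ((if P1 then ['E'] else []) ++ (if P2 then ['N'] else []) ++
     (if P3 then ['S'] else []) ++ (if P4 then ['W'] else [])).count 'S'
    = if P3 then 1 else 0 := by
  simp only [List.count_append]; split_ifs <;> simp

theorem pvCount4_W (P1 P2 P3 P4 : Prop)
    [Decidable P1] [Decidable P2] [Decidable P3] [Decidable P4] :
    ((if P1 then ['E'] else []) ++ (if P2 then ['N'] else []) ++
     (if P3 then ['S'] else []) ++ (if P4 then ['W'] else [])).count 'W'
    = if P4 then 1 else 0 := by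
  simp only [List.count_append]; split_ifs <;> simp

theorem pvCount4_other (P1 P2 P3 P4 : Prop)
    [Decidable P1] [Decidable P2] [Decidable P3] [Decidable P4] (c : Char)
    (h1 : c ≠ 'E') (h2 : c ≠ 'N') (h3 : c ≠ 'S') (h4 : c ≠ 'W') :
    ((if P1 then ['E'] else []) ++ (if P2 then ['N'] else []) ++
     (if P3 then ['S'] else []) ++ (if P4 then ['W'] else [])).count c = 0 := by
  simp only [List.count_append]
  split_ifs <;> simp [Ne.symm h1, Ne.symm h2, Ne.symm h3, Ne.symm h4]

-- B's direction list computed: the filter/map over the literal candidate list is the four-block list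
theorem pvR_eq (b1 b2 b3 b4 : Bool) (c1 c2 c3 c4 : Char) (i1 i2 i3 i4 : Int) (paths : List Int) :
    (([(c1, i1, b1), (c2, i2, b2), (c3, i3, b3), (c4, i4, b4)].filter
        (fun c => c.2.2 && decide (c.2.1 ∈ PySem.Set.ofList paths))).map (fun c => c.1))
    = ((if b1 = true ∧ i1 ∈ paths then [c1] else []) ++
       (if b2 = true ∧ i2 ∈ paths then [c2] else []) ++
       (if b3 = true ∧ i3 ∈ paths then [c3] else []) ++
       (if b4 = true ∧ i4 ∈ paths then [c4] else [])) := by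
  cases b1 <;> cases b2 <;> cases b3 <;> cases b4 <;>
    by_cases h1 : i1 ∈ paths <;> by_cases h2 : i2 ∈ paths <;>
    by_cases h3 : i3 ∈ paths <;> by_cases h4 : i4 ∈ paths <;>
    simp [PySem.Set.mem_ofList, h1, h2, h3, h4]

-- membership in B's valid-neighbour set, over the literal candidate list
theorem pvMem_valid (b1 b2 b3 b4 : Bool) (c1 c2 c3 c4 : Char) (i1 i2 i3 i4 p : Int) :
    p ∈ PySem.Set.ofList (([(c1, i1, b1), (c2, i2, b2), (c3, i3, b3), (c4, i4, b4)].filter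
        (fun c => c.2.2)).map (fun c => c.2.1))
    ↔ ((b1 = true ∧ i1 = p) ∨ (b2 = true ∧ i2 = p) ∨ (b3 = true ∧ i3 = p) ∨ (b4 = true ∧ i4 = p)) := by
  cases b1 <;> cases b2 <;> cases b3 <;> cases b4 <;>
    simp [PySem.Set.mem_ofList, eq_comm]

-- the four-block direction list is strictly increasing in E < N < S < W order
theorem pvPairwise4 (P1 P2 P3 P4 : Prop)
    [Decidable P1] [Decidable P2] [Decidable P3] [Decidable P4] :
    ((if P1 then ['E'] else []) ++ (if P2 then ['N'] else []) ++
     (if P3 then ['S'] else []) ++ (if P4 then ['W'] else [])).Pairwise (· < ·) := by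
  split_ifs <;> decide

set_option maxHeartbeats 1000000 in
theorem pathsToDirection_spec : Claim_equal_pathsToDirection := by
  intro v graph width paths _ hpre
  unfold Spec_pathsToDirection pathsToDirection pathsToDirection_alt
  by_cases hv : v ∈ paths
  · simp [hv]
  simp only [if_neg hv]
  rcases hpre with h | ⟨hw0, hcol, hE, hW, hN, hS⟩

  · exact absurd h hv
  rw [pvFoldA]
  refine Prod.ext ?_ ?_
  · -- the direction string
    simp only [List.nil_append]
    rw [pvR_eq]
    have hperm : ((if (decide (width ≠ 1 ∧ v ∉ PySem.List.pyRange (width - 1) (graph.length : Int) width)) = true ∧ v + 1 ∈ paths then ['E'] else []) ++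
        (if (decide (width < (graph.length : Int) ∧ v ∉ PySem.List.pyRange 0 width 1)) = true ∧ v - width ∈ paths then ['N'] else []) ++
        (if (decide (width < (graph.length : Int) ∧ v ∉ PySem.List.pyRange ((graph.length : Int) - width) (graph.length : Int) 1)) = true ∧ v + width ∈ paths then ['S'] else []) ++
        (if (decide (width ≠ 1 ∧ v ∉ PySem.List.pyRange 0 ((graph.length : Int) - width + 1) width)) = true ∧ v - 1 ∈ paths then ['W'] else [])).Perm
        (paths.filterMap (pvCls v width (graph.length : Int))) := by
      rw [List.perm_iff_count]
      intro c
      rcases Decidable.em (c = 'E' ∨ c = 'W' ∨ c = 'N' ∨ c = 'S') with hc | hc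
      · rcases hc with rfl | rfl | rfl | rfl
        · rw [pvCount4_E, pvKey v width (graph.length : Int) paths 'E' (v + 1) _
            (fun p _ => pvCls_eq_E v width (graph.length : Int) p) hE]
          simp only [decide_eq_true_eq]
        · rw [pvCount4_W, pvKey v width (graph.length : Int) paths 'W' (v - 1) _
            (fun p _ => pvCls_eq_W v width (graph.length : Int) p) hW]
          simp only [decide_eq_true_eq]
        · rw [pvCount4_N, pvKey v width (graph.length : Int) paths 'N' (v - width) _
            (fun p hp => pvCls_eq_N v width (graph.length : Int) p
              (fun hm => ⟨fun he => (hcol hm).1 (he ▸ hp), fun he => (hcol hm).2 (he ▸ hp)⟩)) hN]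
          simp only [decide_eq_true_eq]
        · rw [pvCount4_S, pvKey v width (graph.length : Int) paths 'S' (v + width) _
            (fun p hp => pvCls_eq_S v width (graph.length : Int) p hw0
              (fun hm => ⟨fun he => (hcol hm).1 (he ▸ hp), fun he => (hcol hm).2 (he ▸ hp)⟩)) hS]
          simp only [decide_eq_true_eq]
      · simp only [not_or] at hc
        obtain ⟨h1, h2, h3, h4⟩ := hc
        have hz : (paths.filterMap (pvCls v width (graph.length : Int))).count c = 0 := by
          rw [List.count_eq_zero]
          intro hmem
          obtain ⟨p, _, hp⟩ := List.mem_filterMap.mp hmem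
          rcases pvCls_mem v width (graph.length : Int) p c hp with rfl | rfl | rfl | rfl <;> simp_all
        rw [hz, pvCount4_other _ _ _ _ c h1 h3 h4 h2]
    have hpw := pvPairwise4
      ((decide (width ≠ 1 ∧ v ∉ PySem.List.pyRange (width - 1) (graph.length : Int) width)) = true ∧ v + 1 ∈ paths)
      ((decide (width < (graph.length : Int) ∧ v ∉ PySem.List.pyRange 0 width 1)) = true ∧ v - width ∈ paths)
      ((decide (width < (graph.length : Int) ∧ v ∉ PySem.List.pyRange ((graph.length : Int) - width) (graph.length : Int) 1)) = true ∧ v + width ∈ paths)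
      ((decide (width ≠ 1 ∧ v ∉ PySem.List.pyRange 0 ((graph.length : Int) - width + 1) width)) = true ∧ v - 1 ∈ paths)
    have hs := PySem.List.sorted_eq_of_perm_of_pairwise_lt _ _ (fun c : Char => c) hperm hpw
    rw [hs]
  · -- the jumps
    simp only [List.nil_append]
    apply congrArg
    apply List.filter_congr
    intro p _
    rw [Bool.eq_iff_iff]
    rw [show ∀ o : Option Char, (o.isNone = true ↔ ¬ o.isSome = true) from fun o => by cases o <;> simp]
    rw [pvCls_isSome_iff v width (graph.length : Int) p]
    simp only [decide_eq_true_eq]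
    rw [pvMem_valid]
    simp only [decide_eq_true_eq]
    apply not_congr
    constructor
    · rintro (h | h | h | h)
      · exact Or.inl ⟨h.2, h.1⟩
      · exact Or.inr (Or.inr (Or.inr ⟨h.2, h.1⟩))
      · exact Or.inr (Or.inl ⟨h.2, h.1⟩)
      · exact Or.inr (Or.inr (Or.inl ⟨h.2, h.1⟩))
    · rintro (h | h | h | h)
      · exact Or.inl ⟨h.2, h.1⟩
      · exact Or.inr (Or.inr (Or.inl ⟨h.2, h.1⟩))
      · exact Or.inr (Or.inr (Or.inr ⟨h.2, h.1⟩))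
      · exact Or.inr (Or.inl ⟨h.2, h.1⟩)
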